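-- pv_equiv track=rewrite | github.com/andremoreirafocus/sptransinsightspro | dags-dev/refinedfinishedtrips/services/extract_trips_from_positions.py | _get_representative_in_trip_sentido
-- ===== SOURCE A (Python) =====
-- from collections import Counter
-- from typing import Any, Dict, List, Optional, Tuple
--
-- def _get_representative_in_trip_sentido(
--     position_records: List[Dict[str, Any]],
--     trip_start_record_index: int,
--     trip_end_record_index: int,
--     stop_proximity_threshold_meters: int,
-- ) -> Optional[int]:
--     in_trip_sentidos = []
--     for position_record in position_records[
--         trip_start_record_index : trip_end_record_index + 1
--     ]:
--         at_first_stop = (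
--             position_record["distance_to_first_stop"] < stop_proximity_threshold_meters
--         )
--         at_last_stop = (
--             position_record["distance_to_last_stop"] < stop_proximity_threshold_meters
--         )
--         if at_first_stop or at_last_stop:
--             continue
--         in_trip_sentidos.append(position_record["linha_sentido"])
--
--     if not in_trip_sentidos:
--         return None
--
--     counts = Counter(in_trip_sentidos).most_common()
--     if len(counts) != 1:
--         return None
--     return int(counts[0][0])
-- ===== SOURCE B (Python) =====
-- from typing import Any, Dict, List, Optional
--
--
-- def _get_representative_in_trip_sentido(
--     position_records: List[Dict[str, Any]],
--     trip_start_record_index: int,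
--     trip_end_record_index: int,
--     stop_proximity_threshold_meters: int,
-- ) -> Optional[int]:
--     seen = False
--     candidate = 0
--     for position_record in position_records[
--         trip_start_record_index : trip_end_record_index + 1
--     ]:
--         if (
--             position_record["distance_to_first_stop"] < stop_proximity_threshold_meters
--             or position_record["distance_to_last_stop"]
--             < stop_proximity_threshold_meters
--         ):
--             continue
--         linha_sentido = position_record["linha_sentido"]
--         if not seen:
--             candidate = linha_sentido
--             seen = True
--         elif linha_sentido != candidate:
--             return None
--     return int(candidate) if seen else None
-- ===== Notes on version B (the rewrite author's own statement) =====
-- stated objective: simpler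
-- what changed: Single pass with a seen-flag and one candidate holder that short-circuits on the second distinct linha_sentido, instead of collecting all values into a list and counting distinct values with Counter.most_common().
import Mathlib
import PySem

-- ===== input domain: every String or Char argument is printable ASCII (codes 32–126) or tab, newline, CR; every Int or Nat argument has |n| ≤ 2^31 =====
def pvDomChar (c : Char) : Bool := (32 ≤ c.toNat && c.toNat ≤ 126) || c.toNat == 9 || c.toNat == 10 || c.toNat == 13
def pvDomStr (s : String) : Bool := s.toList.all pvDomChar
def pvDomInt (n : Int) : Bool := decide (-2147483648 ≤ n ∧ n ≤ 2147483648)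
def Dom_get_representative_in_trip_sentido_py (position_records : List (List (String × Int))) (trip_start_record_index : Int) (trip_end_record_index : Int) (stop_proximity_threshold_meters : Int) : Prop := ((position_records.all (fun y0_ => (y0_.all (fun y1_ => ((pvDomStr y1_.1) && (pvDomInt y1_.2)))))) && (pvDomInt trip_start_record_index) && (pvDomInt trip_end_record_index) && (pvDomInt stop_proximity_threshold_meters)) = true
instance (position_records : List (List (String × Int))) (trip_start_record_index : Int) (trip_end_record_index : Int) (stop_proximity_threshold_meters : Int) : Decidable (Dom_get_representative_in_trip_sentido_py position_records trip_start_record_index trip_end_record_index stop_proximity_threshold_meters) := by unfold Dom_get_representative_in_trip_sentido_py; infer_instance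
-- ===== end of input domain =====

-- B replaces A's collect-all-then-Counter.most_common postprocessing by one pass that keeps a seen-flag
-- and a single candidate and short-circuits on the second distinct linha_sentido (objective: simpler).

-- dict lookup (first match, insertion order) shared by both ports and Pre_
def grGetD (r : List (String × Int)) (k : String) (dflt : Int) : Int :=
  (((r.find? (fun p => p.1 == k)).map (fun p => p.2)).getD dflt)

def grHasKey (r : List (String × Int)) (k : String) : Bool :=
  r.any (fun p => p.1 == k)

-- ===== PORT A =====
-- loop body of A: skip records near a stop, else append linha_sentido
def grAStep (stop_proximity_threshold_meters : Int) (acc : List Int) (position_record : List (String × Int)) : List Int :=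
  let at_first_stop := grGetD position_record "distance_to_first_stop" 0 < stop_proximity_threshold_meters
  let at_last_stop := grGetD position_record "distance_to_last_stop" 0 < stop_proximity_threshold_meters
  if at_first_stop || at_last_stop then acc else acc ++ [grGetD position_record "linha_sentido" 0]

-- A's postprocessing: Counter(...).most_common(); None unless exactly one distinct value
def grAFinish (in_trip_sentidos : List Int) : Option Int :=
  if in_trip_sentidos = [] then none
  else
    let counts := PySem.List.sorted (PySem.Dict.counter in_trip_sentidos).items (fun p => p.2) true
    if counts.length ≠ 1 then none
    else counts.head?.map (fun p => p.1)

def get_representative_in_trip_sentido_py (position_records : List (List (String × Int))) (trip_start_record_index : Int) (trip_end_record_index : Int) (stop_proximity_threshold_meters : Int) : Option Int :=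
  grAFinish ((PySem.List.slice position_records (some trip_start_record_index) (some (trip_end_record_index + 1))).foldl (grAStep stop_proximity_threshold_meters) [])

-- ===== PORT B =====
-- B's single pass: seen-flag + candidate, early None on second distinct value
def grBGo (stop_proximity_threshold_meters : Int) : List (List (String × Int)) → Bool → Int → Option Int
  | [], seen, candidate => if seen then some candidate else none
  | position_record :: rest, seen, candidate =>
      if grGetD position_record "distance_to_first_stop" 0 < stop_proximity_threshold_meters
          || grGetD position_record "distance_to_last_stop" 0 < stop_proximity_threshold_meters then
        grBGo stop_proximity_threshold_meters rest seen candidate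
      else
        let linha_sentido := grGetD position_record "linha_sentido" 0
        if !seen then grBGo stop_proximity_threshold_meters rest true linha_sentido
        else if linha_sentido ≠ candidate then none
        else grBGo stop_proximity_threshold_meters rest seen candidate

def get_representative_in_trip_sentido_py_alt (position_records : List (List (String × Int))) (trip_start_record_index : Int) (trip_end_record_index : Int) (stop_proximity_threshold_meters : Int) : Option Int :=
  grBGo stop_proximity_threshold_meters (PySem.List.slice position_records (some trip_start_record_index) (some (trip_end_record_index + 1))) false 0

-- ===== PRECONDITION & SPEC =====
-- Pre_ excludes exactly the KeyError inputs: every record of the processed slice must carry both distance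
-- keys, and the "linha_sentido" key whenever the record is not skipped as being near a stop.
def Pre_get_representative_in_trip_sentido_py (position_records : List (List (String × Int))) (trip_start_record_index : Int) (trip_end_record_index : Int) (stop_proximity_threshold_meters : Int) : Prop :=
  ∀ r ∈ PySem.List.slice position_records (some trip_start_record_index) (some (trip_end_record_index + 1)),
    grHasKey r "distance_to_first_stop" = true ∧ grHasKey r "distance_to_last_stop" = true ∧
    (¬ (grGetD r "distance_to_first_stop" 0 < stop_proximity_threshold_meters ∨
        grGetD r "distance_to_last_stop" 0 < stop_proximity_threshold_meters) →
      grHasKey r "linha_sentido" = true)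
instance (position_records : List (List (String × Int))) (trip_start_record_index : Int) (trip_end_record_index : Int) (stop_proximity_threshold_meters : Int) : Decidable (Pre_get_representative_in_trip_sentido_py position_records trip_start_record_index trip_end_record_index stop_proximity_threshold_meters) := by unfold Pre_get_representative_in_trip_sentido_py; infer_instance

def pvWitness_get_representative_in_trip_sentido_py : (List (List (String × Int))) × Int × Int × Int :=
  ([[("distance_to_first_stop", 100), ("distance_to_last_stop", 120), ("linha_sentido", 7)]], 0, 0, 50)

def Spec_get_representative_in_trip_sentido_py (position_records : List (List (String × Int))) (trip_start_record_index : Int) (trip_end_record_index : Int) (stop_proximity_threshold_meters : Int) (out : Option Int) : Prop := out = get_representative_in_trip_sentido_py_alt position_records trip_start_record_index trip_end_record_index stop_proximity_threshold_meters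
instance (position_records : List (List (String × Int))) (trip_start_record_index : Int) (trip_end_record_index : Int) (stop_proximity_threshold_meters : Int) (out : Option Int) : Decidable (Spec_get_representative_in_trip_sentido_py position_records trip_start_record_index trip_end_record_index stop_proximity_threshold_meters out) := by unfold Spec_get_representative_in_trip_sentido_py; infer_instance

-- ===== CLAIM (what is proved, stated in full; the proofs are below) =====
def Claim_equal_get_representative_in_trip_sentido_py : Prop := ∀ (position_records : List (List (String × Int))) (trip_start_record_index : Int) (trip_end_record_index : Int) (stop_proximity_threshold_meters : Int), Dom_get_representative_in_trip_sentido_py position_records trip_start_record_index trip_end_record_index stop_proximity_threshold_meters → Pre_get_representative_in_trip_sentido_py position_records trip_start_record_index trip_end_record_index stop_proximity_threshold_meters → Spec_get_representative_in_trip_sentido_py position_records trip_start_record_index trip_end_record_index stop_proximity_threshold_meters (get_representative_in_trip_sentido_py position_records trip_start_record_index trip_end_record_index stop_proximity_threshold_meters)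

-- ===== LEMMAS AND PROOFS =====

-- membership is preserved through A's append-only fold
lemma grMem_foldl_step (thr : Int) (rs : List (List (String × Int))) (acc : List Int) (y : Int)
    (hy : y ∈ acc) : y ∈ rs.foldl (grAStep thr) acc := by
  induction rs generalizing acc with
  | nil => exact hy
  | cons r rs ih =>
      simp only [List.foldl_cons]
      apply ih
      simp only [grAStep]
      split
      · exact hy
      · exact List.mem_append_left _ hy

-- a nonempty constant list has set(...) = [c]
lemma grOfList_const (c : Int) (l : List Int) (hne : l ≠ []) (hall : ∀ x ∈ l, x = c) :
    PySem.Set.ofList l = [c] := by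
  induction l with
  | nil => exact absurd rfl hne
  | cons x xs ih =>
      rw [PySem.Set.ofList_cons]
      have hx : x = c := hall x (by simp)
      subst hx
      by_cases hxs : xs = []
      · subst hxs; simp [PySem.Set.ofList_nil, PySem.Set.discard]
      · rw [ih hxs (fun y hy => hall y (by simp [hy]))]
        simp [PySem.Set.discard]

-- A's postprocessing on a nonempty constant list yields that constant
lemma grAFinish_const (c : Int) (l : List Int) (hne : l ≠ []) (hall : ∀ x ∈ l, x = c) :
    grAFinish l = some c := by
  unfold grAFinish
  rw [if_neg hne]
  have hitems : (PySem.Dict.counter l).items = [(c, (l.count c : Int))] := by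
    rw [PySem.Dict.items_counter, grOfList_const c l hne hall]; rfl
  have hsorted : PySem.List.sorted (PySem.Dict.counter l).items (fun p => p.2) true
      = [(c, (l.count c : Int))] := by
    rw [hitems]
    exact PySem.List.sorted_rev_eq_self_of_pairwise _ _ (by simp)
  simp [hsorted]

-- A's postprocessing is None on a list holding two distinct values
lemma grAFinish_two (c x : Int) (l : List Int) (hc : c ∈ l) (hx : x ∈ l) (hne : c ≠ x) :
    grAFinish l = none := by
  unfold grAFinish
  rw [if_neg (List.ne_nil_of_mem hc)]
  have hlen : (PySem.List.sorted (PySem.Dict.counter l).items (fun p => p.2) true).length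
      = (PySem.Set.ofList l).length := by
    rw [PySem.List.length_sorted]
    have : (PySem.Dict.counter l).items.length = (PySem.Dict.counter l).keys.length := by
      simp [PySem.Dict.keys]
    rw [this, PySem.Dict.keys_counter]
  have hcm : c ∈ PySem.Set.ofList l := (PySem.Set.mem_ofList l c).2 hc
  have hxm : x ∈ PySem.Set.ofList l := (PySem.Set.mem_ofList l x).2 hx
  have h2 : (PySem.Set.ofList l).length ≠ 1 := by
    intro h1
    match hs : PySem.Set.ofList l with
    | [] => rw [hs] at hcm; simp at hcm
    | [a] =>
        rw [hs] at hcm hxm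
        simp at hcm hxm
        exact hne (hcm.trans hxm.symm)
    | a :: b :: t => rw [hs] at h1; simp at h1
  rw [if_pos (by rw [hlen]; exact h2)]

-- main invariant, seen = true with candidate c: A's accumulated list is a nonempty all-c list
lemma grLoop_true (thr : Int) (rs : List (List (String × Int))) :
    ∀ (acc : List Int) (c : Int), acc ≠ [] → (∀ x ∈ acc, x = c) →
      grAFinish (rs.foldl (grAStep thr) acc) = grBGo thr rs true c := by
  induction rs with
  | nil =>
      intro acc c hne hall
      simpa [grBGo] using grAFinish_const c acc hne hall
  | cons r rs ih =>
      intro acc c hne hall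
      simp only [List.foldl_cons, grBGo]
      cases hskip : (decide (grGetD r "distance_to_first_stop" 0 < thr)
          || decide (grGetD r "distance_to_last_stop" 0 < thr)) with
      | true =>
          have hA : grAStep thr acc r = acc := by simp [grAStep, hskip]
          rw [hA]
          simp only [if_true]
          exact ih acc c hne hall
      | false =>
          have hA : grAStep thr acc r = acc ++ [grGetD r "linha_sentido" 0] := by
            simp [grAStep, hskip]
          rw [hA]
          simp only [Bool.false_eq_true, if_false, Bool.not_true]
          by_cases heq : grGetD r "linha_sentido" 0 = c
          · rw [if_neg (by simp [heq])]
            have hall' : ∀ x ∈ acc ++ [grGetD r "linha_sentido" 0], x = c := by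
              intro x hx
              rcases List.mem_append.1 hx with h | h
              · exact hall x h
              · simp at h; rw [h, heq]
            exact ih (acc ++ [grGetD r "linha_sentido" 0]) c (by simp) hall'
          · rw [if_pos heq]
            have hcmem : c ∈ acc := by
              match acc, hne with
              | a :: t, _ => exact (hall a (by simp)) ▸ List.mem_cons_self
            exact grAFinish_two c (grGetD r "linha_sentido" 0)
              (rs.foldl (grAStep thr) (acc ++ [grGetD r "linha_sentido" 0]))
              (grMem_foldl_step thr rs _ c (List.mem_append_left _ hcmem))
              (grMem_foldl_step thr rs _ _ (by simp)) (Ne.symm heq)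

-- the loop from the initial state
lemma grLoop_false (thr : Int) (rs : List (List (String × Int))) :
    grAFinish (rs.foldl (grAStep thr) []) = grBGo thr rs false 0 := by
  induction rs with
  | nil => simp [grAFinish, grBGo]
  | cons r rs ih =>
      simp only [List.foldl_cons, grBGo]
      cases hskip : (decide (grGetD r "distance_to_first_stop" 0 < thr)
          || decide (grGetD r "distance_to_last_stop" 0 < thr)) with
      | true =>
          have hA : grAStep thr [] r = [] := by simp [grAStep, hskip]
          rw [hA]
          simp only [if_true]
          exact ih
      | false =>
          have hA : grAStep thr [] r = [grGetD r "linha_sentido" 0] := by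
            simp [grAStep, hskip]
          rw [hA]
          simp only [Bool.false_eq_true, if_false, Bool.not_false]
          rw [if_pos trivial]
          exact grLoop_true thr rs [grGetD r "linha_sentido" 0] _ (by simp) (by simp)

-- ===== VERDICT (by name: the statement is the Claim_ definition above) =====
theorem get_representative_in_trip_sentido_py_spec : Claim_equal_get_representative_in_trip_sentido_py := by
  intro position_records s e thr _ _
  unfold Spec_get_representative_in_trip_sentido_py
  unfold get_representative_in_trip_sentido_py get_representative_in_trip_sentido_py_alt
  exact grLoop_false thr _
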